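/- GENERATED by farm/mkstatement.py from design/units.tsv (unit `gif_decode.5`) and the assertions of Gif/Spec/Seg_gif_decode.lean — do not edit.
   THE STATEMENT of the proof unit `gif_decode.5`: segment 5 of `gif_decode` (17 instructions; entries 0x10af93;
   exits 0x10afdb; ranges 0x10af93-0x10afdb)
   takes each of its entry assertions to one of its exit assertions (`Gif.Spec.gif_decode.Seg5`), given the contracts of its callees.
   What the names mean: ProgX/Base/Spec/Basic.lean (the shared hypotheses), Gif/Spec/Seg_gif_decode.lean (the assertions). The theorem to prove:
   `theorem gif_decode_5_ok : Gif.Spec.gif_decode_5.Statement`. -/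
import Gif.Code
import Gif.Dec.All
import Gif.Labels
import Gif.Spec.Seg_gif_decode
import Gif.Spec.Slurp
namespace Gif.Spec.gif_decode_5
open X86 X86.User Asan

/-- The statement of unit `gif_decode.5`. -/
def Statement : Prop :=
  ∀ (Lay : Layout) (_hLay : Lay.hi = 0x1000000) (μ : Microarch) (_hμ : UserX.MicroOK μ) (u₀ : State)
    (_hcode : HasCodeNat Lay u₀ Gif.L.gif_decode.entry Gif.Code.code_gif_decode.nat Gif.L.gif_decode.size)
    (_h_DGifCloseFile : ∀ (H : Heap) (rest : List Obj) (frames : List (Nat × FrameLayout)) (F : Forest) (R : Rd), Calls Lay μ ProgX.Base.WayInv (ProgX.Base.conv u₀) Gif.L.DGifCloseFile.entry (Gif.Spec.DGifCloseFile.spec H rest frames F R))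
    (_h_asan_store4_noabort : Asan.SmallCheck Lay μ ProgX.Base.WayInv (ProgX.Base.CodeOK u₀) [.rax, .rcx, .rdx] 4 ProgX.Base.L.__asan_store4_noabort.entry)
    (_h_asan_store8_noabort : Asan.SmallCheck Lay μ ProgX.Base.WayInv (ProgX.Base.CodeOK u₀) [.rax, .rcx, .rdx] 8 ProgX.Base.L.__asan_store8_noabort.entry),
    Gif.Spec.gif_decode.Seg5 Lay μ u₀

end Gif.Spec.gif_decode_5
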